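-- pv_equiv track=rewrite | github.com/dev-jsoh/Algorithm | Brute Force/mockExam.py | solution
-- ===== SOURCE A (Python) =====
-- supo_1 = [1, 2, 3, 4, 5]
--
-- supo_2 = [2, 1, 2, 3, 2, 4, 2, 5]
--
-- supo_3 = [3, 3, 1, 1, 2, 2, 4, 4, 5, 5]
--
-- def solution(answers):
--     answer = []
--     results = [0, 0, 0]
--     for i in range(len(answers)):
--         if answers[i] == supo_1[i % len(supo_1)]:
--             results[0] += 1
--         if answers[i] == supo_2[i % len(supo_2)]:
--             results[1] += 1
--         if answers[i] == supo_3[i % len(supo_3)]: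
--             results[2] += 1
--     maxValue = max(results)
--     answer = [i + 1 for i, j in enumerate(results) if j == maxValue]
--     return answer
-- ===== SOURCE B (Python) =====
-- supo_1 = [1, 2, 3, 4, 5]
--
-- supo_2 = [2, 1, 2, 3, 2, 4, 2, 5]
--
-- supo_3 = [3, 3, 1, 1, 2, 2, 4, 4, 5, 5]
--
--
-- def solution(answers):
--     # One bucketing pass: histogram keyed by (position mod 40, value); 40 = lcm(5, 8, 10),
--     # so every supervisor's cycled pattern is constant on each residue class mod 40.
--     cnt = {}
--     for i, a in enumerate(answers):
--         key = (i % 40, a)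
--         cnt[key] = cnt.get(key, 0) + 1
--     scores = [sum(cnt.get((r, pat[r % len(pat)]), 0) for r in range(40))
--               for pat in (supo_1, supo_2, supo_3)]
--     best = max(scores)
--     return [k + 1 for k, s in enumerate(scores) if s == best]
-- ===== Notes on version B (the rewrite author's own statement) =====
-- stated objective: alternative
-- what changed: Instead of comparing every answer against the three cycled patterns, B makes a single bucketing pass that builds a histogram keyed by (index mod 40, value) (40 = lcm of the pattern lengths) and then computes each supervisor's score as a fixed 40-term table-lookup sum, followed by the same max/filter.
import Mathlib
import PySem

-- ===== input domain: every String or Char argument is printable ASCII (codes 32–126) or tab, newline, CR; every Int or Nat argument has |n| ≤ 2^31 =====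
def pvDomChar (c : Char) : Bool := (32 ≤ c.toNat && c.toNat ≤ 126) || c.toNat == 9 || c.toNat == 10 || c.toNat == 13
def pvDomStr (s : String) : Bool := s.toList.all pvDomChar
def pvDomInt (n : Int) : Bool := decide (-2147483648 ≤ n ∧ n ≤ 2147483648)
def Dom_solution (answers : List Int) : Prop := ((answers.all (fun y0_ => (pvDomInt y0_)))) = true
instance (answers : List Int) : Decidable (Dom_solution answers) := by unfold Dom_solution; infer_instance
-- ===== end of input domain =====

-- B replaces A's per-element comparison against three cycled patterns by one bucketing pass
-- building a histogram keyed by (index mod 40, value), each score then being a 40-term lookup sum.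


-- ===== PORT A =====
def supo1 : List Int := [1, 2, 3, 4, 5]
def supo2 : List Int := [2, 1, 2, 3, 2, 4, 2, 5]
def supo3 : List Int := [3, 3, 1, 1, 2, 2, 4, 4, 5, 5]

-- the results list [r0, r1, r2] is modelled as a triple; the three ifs update it in order
def solution (answers : List Int) : List Int :=
  let results : Int × Int × Int :=
    (PySem.List.pyRange 0 answers.length 1).foldl
      (fun (r : Int × Int × Int) i =>
        let r := if PySem.List.pyGetD answers i 0
                    = PySem.List.pyGetD supo1 (PySem.Int.mod i supo1.length) 0
                 then (r.1 + 1, r.2.1, r.2.2) else r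
        let r := if PySem.List.pyGetD answers i 0
                    = PySem.List.pyGetD supo2 (PySem.Int.mod i supo2.length) 0
                 then (r.1, r.2.1 + 1, r.2.2) else r
        if PySem.List.pyGetD answers i 0
            = PySem.List.pyGetD supo3 (PySem.Int.mod i supo3.length) 0
        then (r.1, r.2.1, r.2.2 + 1) else r)
      (0, 0, 0)
  -- max(results) on the 3-element int list, exact for Int
  let maxValue := max (max results.1 results.2.1) results.2.2
  (PySem.List.enumerate [results.1, results.2.1, results.2.2]).filterMap
    (fun p => if p.2 = maxValue then some (p.1 + 1) else none)

-- ===== PORT B =====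
-- one bucketing pass: dict keyed by (i % 40, a), then each score is a 40-term lookup sum
def solution_alt (answers : List Int) : List Int :=
  let cnt : PySem.Dict (Int × Int) Int :=
    (PySem.List.enumerate answers).foldl
      (fun d q =>
        let key := (PySem.Int.mod q.1 40, q.2)
        d.insert key (d.getD key 0 + 1))
      PySem.Dict.empty
  let scores := [supo1, supo2, supo3].map (fun pat =>
    ((PySem.List.pyRange 0 40 1).map
      (fun r => cnt.getD (r, PySem.List.pyGetD pat (PySem.Int.mod r pat.length) 0) 0)).sum)
  -- max(scores) on the 3-element int list, exact for Int
  let m := max (max (scores.getD 0 0) (scores.getD 1 0)) (scores.getD 2 0)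
  (PySem.List.enumerate scores).filterMap
    (fun q => if q.2 = m then some (q.1 + 1) else none)

-- ===== PRECONDITION & SPEC =====
def Spec_solution (answers : List Int) (out : List Int) : Prop := out = solution_alt answers
instance (answers : List Int) (out : List Int) : Decidable (Spec_solution answers out) := by unfold Spec_solution; infer_instance

-- ===== CLAIM =====
def Claim_equal_solution : Prop := ∀ (answers : List Int), Dom_solution answers → Spec_solution answers (solution answers)

-- ===== LEMMAS AND PROOFS =====

-- the bucketed key list B's dict counts
def mkey (xs : List Int) : List (Int × Int) :=
  (PySem.List.enumerate xs).map (fun q => (PySem.Int.mod q.1 40, q.2))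

-- B's per-pattern score, written over mkey counts
def scoreC (pat xs : List Int) : Int :=
  ((PySem.List.pyRange 0 40 1).map
    (fun r => ((mkey xs).count (r, PySem.List.pyGetD pat (PySem.Int.mod r pat.length) 0) : Int))).sum

lemma foldl_bucket (l : List (Int × Int)) (d : PySem.Dict (Int × Int) Int) :
    l.foldl (fun d q =>
        let key := (PySem.Int.mod q.1 40, q.2)
        d.insert key (d.getD key 0 + 1)) d
      = (l.map (fun q => (PySem.Int.mod q.1 40, q.2))).foldl
          (fun d x => d.insert x (d.getD x 0 + 1)) d := by
  induction l generalizing d with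
  | nil => rfl
  | cons q l ih =>
    rw [List.map_cons, List.foldl_cons, List.foldl_cons]
    exact ih _

lemma cntD (xs : List Int) (v : Int × Int) :
    ((PySem.List.enumerate xs).foldl
      (fun (d : PySem.Dict (Int × Int) Int) q =>
        let key := (PySem.Int.mod q.1 40, q.2)
        d.insert key (d.getD key 0 + 1))
      PySem.Dict.empty).getD v 0 = ((mkey xs).count v : Int) := by
  rw [foldl_bucket, PySem.Dict.getD_foldl_insert_add_one]
  simp [mkey]

lemma sum_ind_not_mem (l : List Int) (f : Int → Int) (m x : Int) (hm : m ∉ l) :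
    (l.map (fun r => if ((m, x) : Int × Int) = (r, f r) then (1 : Int) else 0)).sum = 0 := by
  induction l with
  | nil => simp
  | cons r l ih =>
    have hr : m ≠ r := fun h => hm (h ▸ List.mem_cons_self)
    have : ((m, x) : Int × Int) ≠ (r, f r) := fun h => hr (congrArg Prod.fst h)
    rw [List.map_cons, List.sum_cons, if_neg this,
      ih (fun h => hm (List.mem_cons_of_mem _ h)), zero_add]

lemma sum_ind_mem (l : List Int) (f : Int → Int) (m x : Int)
    (hl : l.Nodup) (hm : m ∈ l) :
    (l.map (fun r => if ((m, x) : Int × Int) = (r, f r) then (1 : Int) else 0)).sum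
      = if x = f m then 1 else 0 := by
  induction l with
  | nil => simp at hm
  | cons r l ih =>
    rcases List.mem_cons.1 hm with h | h
    · subst h
      rw [List.map_cons, List.sum_cons, sum_ind_not_mem l f m x (List.nodup_cons.1 hl).1]
      by_cases hx : x = f m <;> simp [hx, Prod.ext_iff]
    · have hr : m ≠ r := fun he => (List.nodup_cons.1 hl).1 (he ▸ h)
      have : ((m, x) : Int × Int) ≠ (r, f r) := fun he => hr (congrArg Prod.fst he)
      simp only [List.map_cons, List.sum_cons, if_neg this,
        ih (List.nodup_cons.1 hl).2 h, zero_add]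

lemma mkey_append (ys : List Int) (x : Int) :
    mkey (ys ++ [x]) = mkey ys ++ [(PySem.Int.mod (ys.length : Int) 40, x)] := by
  simp [mkey, PySem.List.enumerate_append, PySem.List.enumerate_cons]

lemma scoreC_append (pat : List Int) (hdvd : ((pat.length : Int)) ∣ 40)
    (hpos : 0 < (pat.length : Int)) (ys : List Int) (x : Int) :
    scoreC pat (ys ++ [x])
      = scoreC pat ys
        + (if x = PySem.List.pyGetD pat (PySem.Int.mod (ys.length : Int) pat.length) 0
           then (1 : Int) else 0) := by
  set n : Int := (ys.length : Int) with hn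
  have hn0 : 0 ≤ n := by positivity
  set m : Int := PySem.Int.mod n 40 with hm
  have hme : m = n % 40 := PySem.Int.mod_eq_emod_of_pos (by omega)
  have hmlo : 0 ≤ m := by rw [hme]; exact Int.emod_nonneg n (by omega)
  have hmhi : m < 40 := by rw [hme]; exact Int.emod_lt_of_pos n (by omega)
  have hmm : PySem.Int.mod m pat.length = PySem.Int.mod n pat.length := by
    rw [PySem.Int.mod_eq_emod_of_pos hpos, PySem.Int.mod_eq_emod_of_pos hpos, hme,
      Int.emod_emod_of_dvd n hdvd]
  have hcount : ∀ r v, ((mkey (ys ++ [x])).count (r, v) : Int)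
      = ((mkey ys).count (r, v) : Int)
        + (if ((m, x) : Int × Int) = (r, v) then (1 : Int) else 0) := by
    intro r v
    rw [mkey_append, List.count_append, ← hn, ← hm]
    by_cases h : ((m, x) : Int × Int) = (r, v)
    · rw [if_pos h, h]; simp
    · 
      rw [if_neg h]
      simp [List.count_cons, beq_iff_eq]
      intro h1 h2
      exact h (by rw [h1, h2])
  unfold scoreC
  have hrw : ((PySem.List.pyRange 0 40 1).map
      (fun r => ((mkey (ys ++ [x])).count
        (r, PySem.List.pyGetD pat (PySem.Int.mod r pat.length) 0) : Int))).sum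
    = ((PySem.List.pyRange 0 40 1).map
      (fun r => ((mkey ys).count
        (r, PySem.List.pyGetD pat (PySem.Int.mod r pat.length) 0) : Int))).sum
      + ((PySem.List.pyRange 0 40 1).map
      (fun r => if ((m, x) : Int × Int)
          = (r, PySem.List.pyGetD pat (PySem.Int.mod r pat.length) 0)
        then (1 : Int) else 0)).sum := by
    rw [← List.sum_map_add]
    exact congrArg List.sum (List.map_congr_left (fun r _ => hcount r _))
  rw [hrw, sum_ind_mem _ _ m x (PySem.List.nodup_pyRange_one 0 40)
    (PySem.List.mem_pyRange_one.2 ⟨hmlo, hmhi⟩), hmm]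

-- named form of A's loop body, over a fixed source list xs
def stepA (xs : List Int) (r : Int × Int × Int) (i : Int) : Int × Int × Int :=
  let r := if PySem.List.pyGetD xs i 0
              = PySem.List.pyGetD supo1 (PySem.Int.mod i supo1.length) 0
           then (r.1 + 1, r.2.1, r.2.2) else r
  let r := if PySem.List.pyGetD xs i 0
              = PySem.List.pyGetD supo2 (PySem.Int.mod i supo2.length) 0
           then (r.1, r.2.1 + 1, r.2.2) else r
  if PySem.List.pyGetD xs i 0
      = PySem.List.pyGetD supo3 (PySem.Int.mod i supo3.length) 0
  then (r.1, r.2.1, r.2.2 + 1) else r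

lemma foldA_eq (xs : List Int) :
    (PySem.List.pyRange 0 xs.length 1).foldl (stepA xs) (0, 0, 0)
      = (scoreC supo1 xs, scoreC supo2 xs, scoreC supo3 xs) := by
  induction xs using List.reverseRecOn with
  | nil => decide
  | append_singleton ys x ih =>
    have hlen : (((ys ++ [x]).length : Int)) = (ys.length : Int) + 1 := by simp
    rw [hlen, PySem.List.pyRange_one_succ_right (by positivity), List.foldl_append]
    have hcongr :
        (PySem.List.pyRange 0 (ys.length : Int) 1).foldl (stepA (ys ++ [x])) (0, 0, 0)
          = (PySem.List.pyRange 0 (ys.length : Int) 1).foldl (stepA ys) (0, 0, 0) := by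
      apply PySem.List.foldl_congr_mem
      intro acc i hi
      have hmem := (PySem.List.mem_pyRange_one).1 hi
      have hget : PySem.List.pyGetD (ys ++ [x]) i 0 = PySem.List.pyGetD ys i 0 := by
        rw [PySem.List.pyGetD_eq_getElem _ _ hmem.1 (by simpa using by omega),
            PySem.List.pyGetD_eq_getElem _ _ hmem.1 (by omega)]
        exact List.getElem_append_left (by omega)
      simp [stepA, hget]
    rw [hcongr, ih]
    have hx : PySem.List.pyGetD (ys ++ [x]) (ys.length : Int) 0 = x := by
      rw [PySem.List.pyGetD_eq_getElem _ _ (by positivity) (by simp)]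
      simp
    rw [scoreC_append supo1 (by decide) (by decide),
        scoreC_append supo2 (by decide) (by decide),
        scoreC_append supo3 (by decide) (by decide)]
    simp [stepA, hx]
    split_ifs <;> simp

theorem solution_eq_alt (answers : List Int) : solution answers = solution_alt answers := by
  have h : (PySem.List.pyRange 0 answers.length 1).foldl (stepA answers) (0, 0, 0)
      = (scoreC supo1 answers, scoreC supo2 answers, scoreC supo3 answers) :=
    foldA_eq answers
  simp only [solution, solution_alt]
  rw [show (fun (r : Int × Int × Int) i =>
        let r := if PySem.List.pyGetD answers i 0
                    = PySem.List.pyGetD supo1 (PySem.Int.mod i supo1.length) 0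
                 then (r.1 + 1, r.2.1, r.2.2) else r
        let r := if PySem.List.pyGetD answers i 0
                    = PySem.List.pyGetD supo2 (PySem.Int.mod i supo2.length) 0
                 then (r.1, r.2.1 + 1, r.2.2) else r
        if PySem.List.pyGetD answers i 0
            = PySem.List.pyGetD supo3 (PySem.Int.mod i supo3.length) 0
        then (r.1, r.2.1, r.2.2 + 1) else r) = stepA answers from rfl, h]
  simp only [List.map, cntD]
  rfl

-- ===== VERDICT =====
theorem solution_spec : Claim_equal_solution := by
  intro answers _
  exact solution_eq_alt answers
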